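-- pv_equiv track=rewrite | github.com/goettemar/cindergrace-pipeline-gui | infrastructure/updater_service.py | _select_update_assets
-- ===== SOURCE A (Python) =====
-- from typing import Optional, Tuple, List, NamedTuple
--
-- def _select_update_assets(
--
--     assets: List[dict],
--     version: str
-- ) -> Tuple[Optional[str], Optional[str], Optional[str], Optional[str], Optional[str]]:
--     """Select release assets for update tarball and optional SHA256/signature."""
--     if not assets:
--         return None, None, None, None, None
--
--     tarball_name = f"update_{version}.tar.gz"
--     sha_name = f"update_{version}.sha256"
--     minisig_name = f"update_{version}.tar.gz.minisig"
--
--     tarball_url = None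
--     sha256_url = None
--     minisig_url = None
--
--     for asset in assets:
--         name = asset.get("name", "")
--         url = asset.get("browser_download_url", "")
--         if name == tarball_name:
--             tarball_url = url
--         elif name == sha_name:
--             sha256_url = url
--         elif name == minisig_name:
--             minisig_url = url
--
--     return (
--         tarball_url,
--         tarball_name if tarball_url else None,
--         sha256_url,
--         minisig_url,
--         minisig_name if minisig_url else None,
--     )
-- ===== SOURCE B (Python) =====
-- def _last_url(assets, name):
--     """URL of the last asset whose name matches, searching back-to-front."""
--     for asset in reversed(assets):
--         if asset.get("name", "") == name:
--             return asset.get("browser_download_url", "")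
--     return None
--
--
-- def _select_update_assets(assets, version):
--     """Select release assets for update tarball and optional SHA256/signature."""
--     tarball_name = f"update_{version}.tar.gz"
--     sha_name = f"update_{version}.sha256"
--     minisig_name = f"update_{version}.tar.gz.minisig"
--
--     tarball_url = _last_url(assets, tarball_name)
--     sha256_url = _last_url(assets, sha_name)
--     minisig_url = _last_url(assets, minisig_name)
--
--     return (
--         tarball_url,
--         tarball_name if tarball_url else None,
--         sha256_url,
--         minisig_url,
--         minisig_name if minisig_url else None,
--     )
-- ===== Notes on version B (the rewrite author's own statement) =====
-- stated objective: alternative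
-- what changed: Replaces the single forward pass with three accumulators and an if/elif dispatch by three independent back-to-front searches with early exit (first match in reversed order = A's last-match winner).
import Mathlib
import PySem

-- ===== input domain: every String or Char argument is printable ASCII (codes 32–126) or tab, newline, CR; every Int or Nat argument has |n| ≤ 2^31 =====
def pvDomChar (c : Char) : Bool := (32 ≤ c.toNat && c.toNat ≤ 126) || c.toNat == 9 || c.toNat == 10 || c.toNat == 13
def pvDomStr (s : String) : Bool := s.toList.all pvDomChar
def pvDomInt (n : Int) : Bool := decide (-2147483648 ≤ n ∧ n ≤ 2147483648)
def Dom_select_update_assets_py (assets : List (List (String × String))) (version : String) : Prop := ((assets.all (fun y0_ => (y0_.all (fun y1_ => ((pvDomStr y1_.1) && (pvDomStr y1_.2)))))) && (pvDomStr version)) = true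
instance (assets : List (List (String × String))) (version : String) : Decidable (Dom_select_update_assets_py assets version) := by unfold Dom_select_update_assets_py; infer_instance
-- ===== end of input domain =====

-- ===== PORT A =====
-- B replaces A's single forward pass (three accumulators, if/elif dispatch) by three
-- independent back-to-front searches with early exit (alternative decomposition, same cost).
def select_update_assets_py (assets : List (List (String × String))) (version : String) : Option String × Option String × Option String × Option String × Option String :=
  if assets = [] then (none, none, none, none, none)
  else
    let tarball_name := "update_" ++ version ++ ".tar.gz"
    let sha_name := "update_" ++ version ++ ".sha256"
    let minisig_name := "update_" ++ version ++ ".tar.gz.minisig"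
    let r := assets.foldl (fun (acc : Option String × Option String × Option String) asset =>
      let name := (PySem.Dict.mk asset).getD "name" ""
      let url := (PySem.Dict.mk asset).getD "browser_download_url" ""
      if name = tarball_name then (some url, acc.2.1, acc.2.2)
      else if name = sha_name then (acc.1, some url, acc.2.2)
      else if name = minisig_name then (acc.1, acc.2.1, some url)
      else acc) (none, none, none)
    (r.1,
     (match r.1 with | some u => if u = "" then none else some tarball_name | none => none),
     r.2.1,
     r.2.2,
     (match r.2.2 with | some u => if u = "" then none else some minisig_name | none => none))

-- ===== PORT B =====
-- first match in reversed order, early exit (transliteration of Source B's _last_url)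
def pvLastUrl (assets : List (List (String × String))) (name : String) : Option String :=
  match assets.reverse.find? (fun a => (PySem.Dict.mk a).getD "name" "" == name) with
  | some a => some ((PySem.Dict.mk a).getD "browser_download_url" "")
  | none => none

def select_update_assets_py_alt (assets : List (List (String × String))) (version : String) : Option String × Option String × Option String × Option String × Option String :=
  let tarball_name := "update_" ++ version ++ ".tar.gz"
  let sha_name := "update_" ++ version ++ ".sha256"
  let minisig_name := "update_" ++ version ++ ".tar.gz.minisig"
  let tarball_url := pvLastUrl assets tarball_name
  let sha256_url := pvLastUrl assets sha_name
  let minisig_url := pvLastUrl assets minisig_name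
  (tarball_url,
   (match tarball_url with | some u => if u = "" then none else some tarball_name | none => none),
   sha256_url,
   minisig_url,
   (match minisig_url with | some u => if u = "" then none else some minisig_name | none => none))

-- ===== PRECONDITION & SPEC =====
def Spec_select_update_assets_py (assets : List (List (String × String))) (version : String) (out : Option String × Option String × Option String × Option String × Option String) : Prop := out = select_update_assets_py_alt assets version
instance (assets : List (List (String × String))) (version : String) (out : Option String × Option String × Option String × Option String × Option String) : Decidable (Spec_select_update_assets_py assets version out) := by unfold Spec_select_update_assets_py; infer_instance

-- ===== CLAIM (what is proved, stated in full; the proofs are below) =====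
def Claim_equal_select_update_assets_py : Prop := ∀ (assets : List (List (String × String))) (version : String), Dom_select_update_assets_py assets version → Spec_select_update_assets_py assets version (select_update_assets_py assets version)

-- ===== LEMMAS AND PROOFS =====

theorem pv_names_ne1 (v : String) : "update_" ++ v ++ ".tar.gz" ≠ "update_" ++ v ++ ".sha256" := by
  intro h
  have h2 := congrArg String.toList h
  simp at h2

theorem pv_names_ne2 (v : String) : "update_" ++ v ++ ".tar.gz" ≠ "update_" ++ v ++ ".tar.gz.minisig" := by
  intro h
  have h2 := congrArg String.length h
  simp [String.length_append] at h2
  exact absurd h2 (by decide)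

theorem pv_names_ne3 (v : String) : "update_" ++ v ++ ".sha256" ≠ "update_" ++ v ++ ".tar.gz.minisig" := by
  intro h
  have h2 := congrArg String.length h
  simp [String.length_append] at h2
  exact absurd h2 (by decide)

set_option maxHeartbeats 1000000 in
/-- With any fallback acc, A's fold computes B's back-to-front searches. -/
theorem pv_loop_inv (T S M : String) (hTS : T ≠ S) (hTM : T ≠ M) (hSM : S ≠ M)
    (assets : List (List (String × String)))
    (acc : Option String × Option String × Option String) :
    assets.foldl (fun (acc : Option String × Option String × Option String) asset =>
      let name := (PySem.Dict.mk asset).getD "name" ""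
      let url := (PySem.Dict.mk asset).getD "browser_download_url" ""
      if name = T then (some url, acc.2.1, acc.2.2)
      else if name = S then (acc.1, some url, acc.2.2)
      else if name = M then (acc.1, acc.2.1, some url)
      else acc) acc
    = ((assets.reverse.find? (fun a => (PySem.Dict.mk a).getD "name" "" == T)).elim acc.1
         (fun a => some ((PySem.Dict.mk a).getD "browser_download_url" "")),
       (assets.reverse.find? (fun a => (PySem.Dict.mk a).getD "name" "" == S)).elim acc.2.1
         (fun a => some ((PySem.Dict.mk a).getD "browser_download_url" "")),
       (assets.reverse.find? (fun a => (PySem.Dict.mk a).getD "name" "" == M)).elim acc.2.2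
         (fun a => some ((PySem.Dict.mk a).getD "browser_download_url" ""))) := by
  induction assets generalizing acc with
  | nil => simp
  | cons a as ih =>
    obtain ⟨t, s, m⟩ := acc
    simp only [List.foldl_cons, List.reverse_cons, List.find?_append, ih, List.find?_singleton]
    clear ih
    rcases hT : as.reverse.find? (fun a => (PySem.Dict.mk a).getD "name" "" == T) with _ | aT <;>
    rcases hS : as.reverse.find? (fun a => (PySem.Dict.mk a).getD "name" "" == S) with _ | aS <;>
    rcases hM : as.reverse.find? (fun a => (PySem.Dict.mk a).getD "name" "" == M) with _ | aM <;>
    split_ifs with h1 h2 h3 <;>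
    simp_all [Option.elim, Option.or, beq_iff_eq]

-- ===== VERDICT (by name: the statement is the Claim_ definition above) =====
theorem select_update_assets_py_spec : Claim_equal_select_update_assets_py := by
  intro assets version _
  unfold Spec_select_update_assets_py select_update_assets_py select_update_assets_py_alt pvLastUrl
  by_cases hA : assets = []
  · subst hA; simp
  · simp only [if_neg hA,
      pv_loop_inv _ _ _ (pv_names_ne1 version) (pv_names_ne2 version) (pv_names_ne3 version)]
    rcases hT : assets.reverse.find? (fun a => (PySem.Dict.mk a).getD "name" "" == ("update_" ++ version ++ ".tar.gz")) with _ | aT <;>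
    rcases hS : assets.reverse.find? (fun a => (PySem.Dict.mk a).getD "name" "" == ("update_" ++ version ++ ".sha256")) with _ | aS <;>
    rcases hM : assets.reverse.find? (fun a => (PySem.Dict.mk a).getD "name" "" == ("update_" ++ version ++ ".tar.gz.minisig")) with _ | aM <;>
    simp
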